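-- pv_equiv track=rewrite | github.com/ibab/lhcb-software | Alignment/Alignment/AlignmentMonitoring/scripts/trendPlots.py | diffWRTUpdate
-- ===== SOURCE A (Python) =====
-- def diffWRTUpdate(values, runsUpdated):
--     valuesUsed = [[i,j] for i,j in values]
--     currentValue = valuesUsed[0]
--     for i in range(len(valuesUsed)):
--         tmp = valuesUsed[i][:]
--         valuesUsed[i][1] = currentValue[1]
--         try:
--             if valuesUsed[i][0] in runsUpdated: currentValue = tmp
--         except IndexError:
--             pass
--     return [(i[0], i[1]-j[1]) for i, j in zip(values, valuesUsed)]
-- ===== SOURCE B (Python) =====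
-- def diffWRTUpdate(values, runsUpdated):
--     updSet = set(runsUpdated)
--     v0 = values[0][1]
--     out = []
--     for i, (r, v) in enumerate(values):
--         base = v0
--         for rr, vv in reversed(values[:i]):
--             if rr in updSet:
--                 base = vv
--                 break
--         out.append((r, v - base))
--     return out
-- ===== Notes on version B (the rewrite author's own statement) =====
-- stated objective: alternative
-- what changed: B is stateless: instead of A's running buffer that is mutated and re-snapshotted as the loop advances, B computes each entry's baseline independently by searching backwards from its position for the most recent updated run, with set-based membership replacing A's per-element list scan; no mutable copy, no tmp snapshot, no zip pass.
import Mathlib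
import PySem

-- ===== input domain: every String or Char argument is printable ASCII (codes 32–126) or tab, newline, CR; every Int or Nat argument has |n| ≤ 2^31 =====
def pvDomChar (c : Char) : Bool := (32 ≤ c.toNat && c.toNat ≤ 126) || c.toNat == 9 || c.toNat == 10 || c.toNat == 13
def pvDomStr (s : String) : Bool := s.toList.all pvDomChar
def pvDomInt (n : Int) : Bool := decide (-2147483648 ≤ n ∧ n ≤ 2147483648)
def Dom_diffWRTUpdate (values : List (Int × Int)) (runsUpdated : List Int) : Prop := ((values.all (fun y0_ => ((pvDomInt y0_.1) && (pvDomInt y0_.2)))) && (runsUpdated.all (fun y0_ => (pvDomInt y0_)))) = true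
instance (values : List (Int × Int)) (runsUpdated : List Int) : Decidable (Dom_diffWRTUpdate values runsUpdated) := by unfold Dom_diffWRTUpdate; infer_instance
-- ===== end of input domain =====

-- B replaces A's running mutable buffer (copy, in-place overwrite, tmp snapshot, final
-- zip-subtraction) by a stateless per-entry backward search for the most recent updated
-- run (objective: alternative); equivalence is about the return value only.

-- ===== PORT A =====
-- step of A's for-loop over range(len(valuesUsed)): state = (valuesUsed, currentValue);
-- tmp is a snapshot of valuesUsed[i] before the overwrite valuesUsed[i][1] = currentValue[1];
-- the try/except IndexError is dead code (the membership test cannot raise IndexError).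
def diffWRTUpdateStep (runsUpdated : List Int) (st : List (Int × Int) × (Int × Int)) (i : Nat) :
    List (Int × Int) × (Int × Int) :=
  let tmp := st.1.getD i (0, 0)
  let used := st.1.set i (tmp.1, st.2.2)
  let cur := if tmp.1 ∈ runsUpdated then tmp else st.2
  (used, cur)

def diffWRTUpdate (values : List (Int × Int)) (runsUpdated : List Int) : List (Int × Int) :=
  let valuesUsed := values.map (fun p => (p.1, p.2))
  -- valuesUsed[0]: IndexError on empty input, excluded by Pre_ below
  let currentValue := valuesUsed.headD (0, 0)
  let final := (List.range valuesUsed.length).foldl (diffWRTUpdateStep runsUpdated)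
      (valuesUsed, currentValue)
  (values.zip final.1).map (fun p => (p.1.1, p.1.2 - p.2.2))

-- ===== PORT B =====
-- inner loop 'for rr, vv in reversed(values[:i]): if rr in updSet: base = vv; break':
-- first hit of a run in updSet scanning the reversed prefix, default v0
-- (values[:i] with i : Nat is List.take i — exact for nonnegative i).
def diffBase (updSet : PySem.Set Int) (v0 : Int) (prefixRev : List (Int × Int)) : Int :=
  match prefixRev.find? (fun q => PySem.Set.contains updSet q.1) with
  | some q => q.2
  | none => v0

-- 'for i, (r, v) in enumerate(values)' as recursion carrying the index i
def diffAltLoop (values : List (Int × Int)) (updSet : PySem.Set Int) (v0 : Int) :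
    Nat → List (Int × Int) → List (Int × Int)
  | _, [] => []
  | i, (r, v) :: rest =>
      (r, v - diffBase updSet v0 ((values.take i).reverse)) ::
        diffAltLoop values updSet v0 (i + 1) rest

def diffWRTUpdate_alt (values : List (Int × Int)) (runsUpdated : List Int) : List (Int × Int) :=
  let updSet := PySem.Set.ofList runsUpdated
  match values with
  | [] => []  -- values[0][1]: IndexError on empty input, excluded by Pre_ below
  | (_, v0) :: _ => diffAltLoop values updSet v0 0 values

-- ===== PRECONDITION & SPEC =====
-- Both A and B raise IndexError on empty `values` (values[0]); Pre_ excludes exactly that.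
def Pre_diffWRTUpdate (values : List (Int × Int)) (runsUpdated : List Int) : Prop := values ≠ []
instance (values : List (Int × Int)) (runsUpdated : List Int) : Decidable (Pre_diffWRTUpdate values runsUpdated) := by unfold Pre_diffWRTUpdate; infer_instance
def pvWitness_diffWRTUpdate : (List (Int × Int)) × List Int := ([(1, 2), (3, 4)], [1])

def Spec_diffWRTUpdate (values : List (Int × Int)) (runsUpdated : List Int) (out : List (Int × Int)) : Prop := out = diffWRTUpdate_alt values runsUpdated
instance (values : List (Int × Int)) (runsUpdated : List Int) (out : List (Int × Int)) : Decidable (Spec_diffWRTUpdate values runsUpdated out) := by unfold Spec_diffWRTUpdate; infer_instance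

-- ===== CLAIM (what is proved, stated in full; the proofs are below) =====
def Claim_equal_diffWRTUpdate : Prop := ∀ (values : List (Int × Int)) (runsUpdated : List Int), Dom_diffWRTUpdate values runsUpdated → Pre_diffWRTUpdate values runsUpdated → Spec_diffWRTUpdate values runsUpdated (diffWRTUpdate values runsUpdated)

-- ===== LEMMAS AND PROOFS =====

-- common reference recursion: the 'difference from the last updated run' stream
def diffGo (runsUpdated : List Int) (last : Int) : List (Int × Int) → List (Int × Int)
  | [] => []
  | (r, v) :: rest => (r, v - last) :: diffGo runsUpdated (if r ∈ runsUpdated then v else last) rest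

-- A side: lastBefore list of A's loop together with the final currentValue
def diffAux (runsUpdated : List Int) (cur : Int × Int) :
    List (Int × Int) → List (Int × Int) × (Int × Int)
  | [] => ([], cur)
  | (r, v) :: rest =>
    let res := diffAux runsUpdated (if r ∈ runsUpdated then (r, v) else cur) rest
    ((r, cur.2) :: res.1, res.2)

theorem loop_lemma (runsUpdated : List Int) (vs : List (Int × Int)) :
    ∀ (pre : List (Int × Int)) (cur : Int × Int),
    (List.range' pre.length vs.length).foldl (diffWRTUpdateStep runsUpdated) (pre ++ vs, cur)
      = (pre ++ (diffAux runsUpdated cur vs).1, (diffAux runsUpdated cur vs).2) := by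
  induction vs with
  | nil => intro pre cur; simp [diffAux]
  | cons hd tl ih =>
    intro pre cur
    obtain ⟨r, v⟩ := hd
    simp only [List.length_cons, List.range'_succ, List.foldl_cons]
    have hstep : diffWRTUpdateStep runsUpdated (pre ++ (r, v) :: tl, cur) pre.length
        = ((pre ++ [(r, cur.2)]) ++ tl, if r ∈ runsUpdated then (r, v) else cur) := by
      simp [diffWRTUpdateStep]
    rw [hstep]
    have h := ih (pre ++ [(r, cur.2)]) (if r ∈ runsUpdated then (r, v) else cur)
    simp only [List.length_append, List.length_cons, List.length_nil] at h ⊢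
    rw [show pre.length + 1 = pre.length + (0+1) by omega] at h
    rw [h]
    simp [diffAux]

theorem zip_aux (runsUpdated : List Int) (vs : List (Int × Int)) :
    ∀ (cur : Int × Int),
    (vs.zip (diffAux runsUpdated cur vs).1).map (fun p => (p.1.1, p.1.2 - p.2.2))
      = diffGo runsUpdated cur.2 vs := by
  induction vs with
  | nil => intro cur; simp [diffAux, diffGo]
  | cons hd tl ih =>
    intro cur
    obtain ⟨r, v⟩ := hd
    simp only [diffAux, diffGo, List.zip_cons_cons, List.map_cons]
    rw [ih]
    by_cases h : r ∈ runsUpdated <;> simp [h]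

-- B side: extending the scanned prefix by one entry updates the backward-search base
theorem diffBase_snoc (runsUpdated : List Int) (v0 : Int) (p : List (Int × Int))
    (r v : Int) :
    diffBase (PySem.Set.ofList runsUpdated) v0 ((p ++ [(r, v)]).reverse)
      = if r ∈ runsUpdated then v else diffBase (PySem.Set.ofList runsUpdated) v0 p.reverse := by
  simp only [List.reverse_append, List.reverse_cons, List.reverse_nil, List.nil_append,
    List.cons_append, diffBase, List.find?_cons]
  by_cases h : r ∈ runsUpdated <;> simp [h]

theorem alt_loop_lemma (runsUpdated : List Int) (v0 : Int) :
    ∀ (s p : List (Int × Int)),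
    diffAltLoop (p ++ s) (PySem.Set.ofList runsUpdated) v0 p.length s
      = diffGo runsUpdated (diffBase (PySem.Set.ofList runsUpdated) v0 p.reverse) s := by
  intro s
  induction s with
  | nil => intro p; simp [diffAltLoop, diffGo]
  | cons hd tl ih =>
    intro p
    obtain ⟨r, v⟩ := hd
    have htake : (p ++ (r, v) :: tl).take p.length = p := by
      simp
    have h2 := ih (p ++ [(r, v)])
    simp only [List.append_assoc, List.cons_append, List.nil_append,
      List.length_append, List.length_cons, List.length_nil] at h2
    simp only [diffAltLoop, diffGo, htake]
    rw [h2, diffBase_snoc]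

theorem go_eq (runsUpdated : List Int) (r0 v0 : Int) (rest : List (Int × Int)) :
    diffWRTUpdate ((r0, v0) :: rest) runsUpdated
      = diffGo runsUpdated v0 ((r0, v0) :: rest) := by
  have hmap : ((r0, v0) :: rest).map (fun p : Int × Int => (p.1, p.2)) = (r0, v0) :: rest := by
    simp
  unfold diffWRTUpdate
  simp only [hmap, List.headD_cons]
  have h := loop_lemma runsUpdated ((r0, v0) :: rest) [] (r0, v0)
  simp only [List.nil_append, List.length_nil, List.range_eq_range'] at h ⊢
  rw [h]
  simpa using zip_aux runsUpdated ((r0, v0) :: rest) (r0, v0)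

-- ===== VERDICT (by name: the statement is the Claim_ definition above) =====
theorem diffWRTUpdate_spec : Claim_equal_diffWRTUpdate := by
  intro values runsUpdated _ hpre
  unfold Spec_diffWRTUpdate
  match values with
  | [] => exact absurd rfl hpre
  | (r0, v0) :: rest =>
    rw [go_eq]
    show diffGo runsUpdated v0 ((r0, v0) :: rest)
      = diffAltLoop ((r0, v0) :: rest) (PySem.Set.ofList runsUpdated) v0 0 ((r0, v0) :: rest)
    have h := alt_loop_lemma runsUpdated v0 ((r0, v0) :: rest) []
    simp only [List.nil_append, List.length_nil, List.reverse_nil] at h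
    rw [h]
    simp [diffBase]
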